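-- pv_equiv track=rewrite | github.com/lanceberc/GOES | overlay.py | mergeciraandnesdis
-- ===== SOURCE A (Python) =====
-- def mergeciraandnesdis(cira, nesdis):
--     # Mergesort with CIRA first if two images have same timestamp
--     cira.sort()
--     nesdis.sort()
--     l = []
--     c = 0
--     n = 0
--     while (c < len(cira)) or (n < len(nesdis)):
--         if c == len(cira):
--             l.append(nesdis[n])
--             n += 1
--         elif n == len(nesdis):
--             l.append(cira[c])
--             c += 1
--         elif cira[c][:-4] <= nesdis[n][:-4]:
--             l.append(cira[c])
--             c += 1
--         else:
--             l.append(nesdis[n])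
--             n += 1
--     return(l)
-- ===== SOURCE B (Python) =====
-- def mergeciraandnesdis(cira, nesdis):
--     # Run-based merge: after the same in-place sorts, alternately move the
--     # maximal leading block of cira whose key <= nesdis's head key, then the
--     # maximal leading block of nesdis whose key < cira's head key.
--     cira.sort()
--     nesdis.sort()
--     return _merge_runs(cira, nesdis)
--
--
-- def _merge_runs(c, n):
--     if not c or not n:
--         return c + n
--     if c[0][:-4] <= n[0][:-4]:
--         i = 1
--         while i < len(c) and c[i][:-4] <= n[0][:-4]:
--             i += 1
--         return c[:i] + _merge_runs(c[i:], n)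
--     else:
--         j = 1
--         while j < len(n) and n[j][:-4] < c[0][:-4]:
--             j += 1
--         return n[:j] + _merge_runs(c, n[j:])
-- ===== Notes on version B (the rewrite author's own statement) =====
-- stated objective: alternative
-- what changed: Replaces the element-wise two-pointer index merge with a recursive run-based merge that alternately moves the maximal leading block of cira whose truncated key is <= nesdis's head key and the maximal leading block of nesdis whose key is < cira's head key, splicing whole slices instead of appending one element per comparison.
import Mathlib
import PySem

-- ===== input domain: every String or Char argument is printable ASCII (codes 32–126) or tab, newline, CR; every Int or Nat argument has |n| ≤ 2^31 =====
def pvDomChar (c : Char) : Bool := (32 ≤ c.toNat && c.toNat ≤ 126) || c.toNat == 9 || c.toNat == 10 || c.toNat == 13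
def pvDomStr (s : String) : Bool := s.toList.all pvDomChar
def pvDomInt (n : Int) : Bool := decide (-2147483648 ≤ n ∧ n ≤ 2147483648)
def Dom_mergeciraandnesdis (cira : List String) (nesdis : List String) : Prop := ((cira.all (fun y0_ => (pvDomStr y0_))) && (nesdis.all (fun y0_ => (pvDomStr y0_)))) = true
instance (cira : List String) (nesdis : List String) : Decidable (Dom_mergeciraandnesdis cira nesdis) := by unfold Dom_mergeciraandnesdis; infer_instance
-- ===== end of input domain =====

-- B replaces A's element-wise two-pointer merge loop with a recursive run-based merge
-- that moves maximal leading blocks (objective: alternative structure, same cost).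
-- Both A and B sort the argument lists in place (the same side effect); the equivalence
-- proved here is about the return value.

-- ===== PORT A =====
-- x[:-4], the merge key
def pyKey (s : String) : String := PySem.Str.slice s none (some (-4))

-- the while loop of A, walking indices c and n; every list access is provably in
-- range where the loop reads it, rendered with getD
-- (Python's `c == len(cira)` / `n == len(nesdis)` are written as ≤: on every state the
-- loop reaches, c ≤ len(cira) and n ≤ len(nesdis), so ≤ is the same test as ==;
-- it also makes the loop's termination measure decrease on every branch)
def pvLoopA (cira nesdis : List String) (c n : Nat) : List String :=
  if h : c < cira.length ∨ n < nesdis.length then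
    if hc : cira.length ≤ c then
      nesdis.getD n "" :: pvLoopA cira nesdis c (n + 1)
    else if hn : nesdis.length ≤ n then
      cira.getD c "" :: pvLoopA cira nesdis (c + 1) n
    else if pyKey (cira.getD c "") ≤ pyKey (nesdis.getD n "") then
      cira.getD c "" :: pvLoopA cira nesdis (c + 1) n
    else
      nesdis.getD n "" :: pvLoopA cira nesdis c (n + 1)
  else []
termination_by (cira.length - c) + (nesdis.length - n)
decreasing_by all_goals omega

def mergeciraandnesdis (cira : List String) (nesdis : List String) : List String :=
  pvLoopA (PySem.List.sorted cira (fun x => x) false)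
          (PySem.List.sorted nesdis (fun x => x) false) 0 0

-- ===== PORT B =====
-- the inner `while i < len(c) and <pred c[i]>: i += 1` scans of Source B, counting the
-- leading elements of the remaining block that satisfy the predicate
def pvRun (p : String → Bool) : List String → Nat
  | [] => 0
  | x :: xs => if p x then pvRun p xs + 1 else 0

-- _merge_runs of Source B
def pvMergeRuns (c n : List String) : List String :=
  match c, n with
  | [], n => n
  | c, [] => c
  | hc :: tc, hn :: tn =>
    if pyKey hc ≤ pyKey hn then
      let i := 1 + pvRun (fun x => pyKey x ≤ pyKey hn) tc
      (hc :: tc).take i ++ pvMergeRuns ((hc :: tc).drop i) (hn :: tn)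
    else
      let j := 1 + pvRun (fun x => pyKey x < pyKey hc) tn
      (hn :: tn).take j ++ pvMergeRuns (hc :: tc) ((hn :: tn).drop j)
termination_by c.length + n.length
decreasing_by all_goals simp


def mergeciraandnesdis_alt (cira : List String) (nesdis : List String) : List String :=
  pvMergeRuns (PySem.List.sorted cira (fun x => x) false)
              (PySem.List.sorted nesdis (fun x => x) false)

-- ===== PRECONDITION & SPEC =====
def Spec_mergeciraandnesdis (cira : List String) (nesdis : List String) (out : List String) : Prop := out = mergeciraandnesdis_alt cira nesdis
instance (cira : List String) (nesdis : List String) (out : List String) : Decidable (Spec_mergeciraandnesdis cira nesdis out) := by unfold Spec_mergeciraandnesdis; infer_instance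

-- ===== CLAIM (what is proved, stated in full; the proofs are below) =====
def Claim_equal_mergeciraandnesdis : Prop := ∀ (cira : List String) (nesdis : List String), Dom_mergeciraandnesdis cira nesdis → Spec_mergeciraandnesdis cira nesdis (mergeciraandnesdis cira nesdis)

-- ===== LEMMAS AND PROOFS =====

-- plain element-wise merge: the common reference both ports are reduced to
def pvMergeElems (c n : List String) : List String :=
  match c, n with
  | [], n => n
  | c, [] => c
  | hc :: tc, hn :: tn =>
    if pyKey hc ≤ pyKey hn then hc :: pvMergeElems tc (hn :: tn)
    else hn :: pvMergeElems (hc :: tc) tn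
termination_by c.length + n.length
decreasing_by all_goals simp

theorem pvMergeElems_nil_left (n : List String) : pvMergeElems [] n = n := by
  simp [pvMergeElems]

theorem pvMergeElems_nil_right (c : List String) : pvMergeElems c [] = c := by
  cases c <;> simp [pvMergeElems]

-- A's index loop walks the element-wise merge of the remaining suffixes
theorem pvLoopA_eq_mergeElems (cira nesdis : List String) (c n : Nat) :
    pvLoopA cira nesdis c n = pvMergeElems (cira.drop c) (nesdis.drop n) := by
  induction c, n using pvLoopA.induct cira nesdis with
  | case1 c n h hc ih =>
    have hn : n < nesdis.length := by omega
    rw [pvLoopA, dif_pos h, dif_pos hc, ih, List.drop_of_length_le hc,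
      List.drop_eq_getElem_cons hn, pvMergeElems_nil_left, pvMergeElems_nil_left,
      List.getD_eq_getElem _ _ hn]
  | case2 c n h hc hn ih =>
    have hc' : c < cira.length := by omega
    rw [pvLoopA, dif_pos h, dif_neg hc, dif_pos hn, ih, List.drop_of_length_le hn,
      List.drop_eq_getElem_cons hc', pvMergeElems_nil_right, pvMergeElems_nil_right,
      List.getD_eq_getElem _ _ hc']
  | case3 c n h hc hn hk ih =>
    have hc' : c < cira.length := by omega
    have hn' : n < nesdis.length := by omega
    rw [pvLoopA, dif_pos h, dif_neg hc, dif_neg hn]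
    simp only [List.getD_eq_getElem _ _ hc', List.getD_eq_getElem _ _ hn'] at hk ⊢
    rw [if_pos hk, ih]
    conv_rhs => rw [List.drop_eq_getElem_cons hc', List.drop_eq_getElem_cons hn']
    rw [pvMergeElems, if_pos hk, ← List.drop_eq_getElem_cons hn']
  | case4 c n h hc hn hk ih =>
    have hc' : c < cira.length := by omega
    have hn' : n < nesdis.length := by omega
    rw [pvLoopA, dif_pos h, dif_neg hc, dif_neg hn]
    simp only [List.getD_eq_getElem _ _ hc', List.getD_eq_getElem _ _ hn'] at hk ⊢
    rw [if_neg hk, ih]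
    conv_rhs => rw [List.drop_eq_getElem_cons hc', List.drop_eq_getElem_cons hn']
    rw [pvMergeElems, if_neg hk, ← List.drop_eq_getElem_cons hc']
  | case5 c n h =>
    rw [pvLoopA, dif_neg h, List.drop_of_length_le (by omega), List.drop_of_length_le (by omega),
      pvMergeElems_nil_left]

-- the element-wise merge consumes a whole run of the left list at once
theorem pvMergeElems_run_left (hn : String) (tn c : List String) :
    pvMergeElems c (hn :: tn) =
      c.take (pvRun (fun x => pyKey x ≤ pyKey hn) c) ++
        pvMergeElems (c.drop (pvRun (fun x => pyKey x ≤ pyKey hn) c)) (hn :: tn) := by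
  induction c with
  | nil => simp [pvRun]
  | cons hc tc ih =>
    by_cases h : pyKey hc ≤ pyKey hn
    · rw [pvMergeElems, if_pos h]
      simp only [pvRun, h, decide_true, if_pos, List.take_succ_cons, List.drop_succ_cons]
      rw [ih]; simp
    · simp only [pvRun, h, decide_false]
      simp

-- ... and symmetrically a whole run of the right list
theorem pvMergeElems_run_right (hc : String) (tc n : List String) :
    pvMergeElems (hc :: tc) n =
      n.take (pvRun (fun x => pyKey x < pyKey hc) n) ++
        pvMergeElems (hc :: tc) (n.drop (pvRun (fun x => pyKey x < pyKey hc) n)) := by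
  induction n with
  | nil => simp [pvRun]
  | cons hn tn ih =>
    by_cases h : pyKey hn < pyKey hc
    · rw [pvMergeElems, if_neg (not_le.mpr h)]
      simp only [pvRun, h, decide_true, if_pos, List.take_succ_cons, List.drop_succ_cons]
      rw [ih]; simp
    · simp only [pvRun, h, decide_false]
      simp

-- B's run merge computes the element-wise merge
theorem pvMergeRuns_eq_mergeElems (c n : List String) :
    pvMergeRuns c n = pvMergeElems c n := by
  induction c, n using pvMergeRuns.induct with
  | case1 n => rw [pvMergeRuns, pvMergeElems_nil_left]
  | case2 c h =>
    cases c with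
    | nil => exact absurd rfl h
    | cons hc tc =>
      rw [pvMergeRuns, pvMergeElems_nil_right]
      simp
  | case3 hc tc hn tn hk i ih =>
    rw [pvMergeRuns, if_pos hk]
    simp only [i, Nat.add_comm 1, List.take_succ_cons, List.drop_succ_cons] at ih ⊢
    rw [ih]
    conv_rhs => rw [pvMergeElems, if_pos hk, pvMergeElems_run_left hn tn tc]
    simp
  | case4 hc tc hn tn hk j ih =>
    rw [pvMergeRuns, if_neg hk]
    simp only [j, Nat.add_comm 1, List.take_succ_cons, List.drop_succ_cons] at ih ⊢
    rw [ih]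
    conv_rhs => rw [pvMergeElems, if_neg hk, pvMergeElems_run_right hc tc tn]
    simp

-- ===== VERDICT (by name: the statement is the Claim_ definition above) =====
theorem mergeciraandnesdis_spec : Claim_equal_mergeciraandnesdis := by
  intro cira nesdis _
  unfold Spec_mergeciraandnesdis mergeciraandnesdis mergeciraandnesdis_alt
  rw [pvLoopA_eq_mergeElems, pvMergeRuns_eq_mergeElems]
  simp
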